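-- pv_equiv track=rewrite | github.com/martinfaucheux/advent-of-code | 2024/13/run.py | get_ordered_combination
-- ===== SOURCE A (Python) =====
-- Vect = tuple[int, int]
--
-- def get_ordered_combination(limit: int | Vect = 100):
--     """
--     Iterator for tuples (a, b) such that 0 <= a, b <= limit and
--     f(a, b) = a * 3 + b, iterating in non-decreasing order of f(a, b).
--     """
--     if type(limit) is int:
--         a_max = b_max = limit
--     else:
--         a_max, b_max = limit
--
--     for f_value in range((a_max + 1) * 3 + b_max + 1):
--         for a in range(a_max + 1):
--             b = f_value - a * 3
--             if 0 <= b <= b_max: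
--                 yield a, b
-- ===== SOURCE B (Python) =====
-- Vect = tuple[int, int]
--
-- def get_ordered_combination(limit: int | Vect = 100):
--     """
--     Iterator for tuples (a, b) such that 0 <= a, b <= limit and
--     f(a, b) = a * 3 + b, iterating in non-decreasing order of f(a, b).
--
--     Alternative strategy: instead of scanning every candidate a for every
--     f_value, compute the valid a-interval for each f_value directly via
--     ceil/floor division bounds and yield it without any filtering.
--     """
--     if type(limit) is int:
--         a_max = b_max = limit
--     else:
--         a_max, b_max = limit
--
--     for f_value in range(3 * a_max + b_max + 1):
--         lo = max(0, -((b_max - f_value) // 3))   # ceil((f_value - b_max) / 3)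
--         hi = min(a_max, f_value // 3)
--         for a in range(lo, hi + 1):
--             yield a, f_value - 3 * a
-- ===== Notes on version B (the rewrite author's own statement) =====
-- stated objective: alternative
-- what changed: Instead of scanning every candidate a for every f_value and filtering by the bound on b, B computes the valid a-interval per f_value via ceil/floor division bounds and yields it directly with no inner filter pass; total cost is dominated by the output size either way.
import Mathlib
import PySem

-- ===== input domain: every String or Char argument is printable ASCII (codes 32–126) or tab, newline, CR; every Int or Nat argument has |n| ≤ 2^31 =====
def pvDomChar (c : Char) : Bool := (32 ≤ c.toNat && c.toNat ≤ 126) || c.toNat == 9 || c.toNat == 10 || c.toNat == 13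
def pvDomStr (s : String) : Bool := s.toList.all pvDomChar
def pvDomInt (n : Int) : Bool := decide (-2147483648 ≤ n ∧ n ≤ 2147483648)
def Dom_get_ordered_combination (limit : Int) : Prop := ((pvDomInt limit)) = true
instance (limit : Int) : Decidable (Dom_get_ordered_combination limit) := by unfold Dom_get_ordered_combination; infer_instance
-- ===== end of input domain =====

-- B replaces A's scan of every candidate a for every f_value by computing the valid
-- a-interval per f_value via ceil/floor division bounds (objective: alternative).
-- Both Pythons are generators; the ports are the lists of yielded pairs.

-- ===== PORT A =====
def get_ordered_combination (limit : Int) : List (Int × Int) :=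
  (PySem.List.pyRange 0 ((limit + 1) * 3 + limit + 1)).foldl (fun acc f_value =>
    (PySem.List.pyRange 0 (limit + 1)).foldl (fun acc2 a =>
      if 0 ≤ f_value - a * 3 ∧ f_value - a * 3 ≤ limit then acc2 ++ [(a, f_value - a * 3)]
      else acc2) acc) []

-- ===== PORT B =====
def get_ordered_combination_alt (limit : Int) : List (Int × Int) :=
  (PySem.List.pyRange 0 (3 * limit + limit + 1)).foldl (fun acc f_value =>
    let lo := max 0 (-(PySem.Int.floordiv (limit - f_value) 3))
    let hi := min limit (PySem.Int.floordiv f_value 3)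
    acc ++ (PySem.List.pyRange lo (hi + 1)).map (fun a => (a, f_value - 3 * a))) []

-- ===== PRECONDITION & SPEC =====
def Spec_get_ordered_combination (limit : Int) (out : List (Int × Int)) : Prop := out = get_ordered_combination_alt limit
instance (limit : Int) (out : List (Int × Int)) : Decidable (Spec_get_ordered_combination limit out) := by unfold Spec_get_ordered_combination; infer_instance

-- ===== CLAIM (what is proved, stated in full; the proofs are below) =====
def Claim_equal_get_ordered_combination : Prop := ∀ (limit : Int), Dom_get_ordered_combination limit → Spec_get_ordered_combination limit (get_ordered_combination limit)

-- ===== LEMMAS AND PROOFS =====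

-- filtering an integer range by an interval condition yields the clipped range
lemma filter_pyRange_interval (lo hi : Int) :
    ∀ (a b : Int), (PySem.List.pyRange a b).filter (fun x => decide (lo ≤ x ∧ x ≤ hi))
      = PySem.List.pyRange (max a lo) (min b (hi + 1)) := by
  intro a b
  by_cases hab : b ≤ a
  · rw [PySem.List.pyRange_one_eq_nil hab, PySem.List.pyRange_one_eq_nil (by omega)]
    rfl
  · push_neg at hab
    have h : ∀ n : Nat, ∀ a : Int, (b - a).toNat = n →
        (PySem.List.pyRange a b).filter (fun x => decide (lo ≤ x ∧ x ≤ hi))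
          = PySem.List.pyRange (max a lo) (min b (hi + 1)) := by
      intro n
      induction n with
      | zero =>
        intro a ha
        rw [PySem.List.pyRange_one_eq_nil (by omega), PySem.List.pyRange_one_eq_nil (by omega)]
        rfl
      | succ k ih =>
        intro a ha
        have hlt : a < b := by omega
        rw [PySem.List.pyRange_one_cons hlt, List.filter_cons]
        by_cases hc : lo ≤ a ∧ a ≤ hi
        · simp only [hc, decide_true, and_self, if_true]
          rw [ih (a + 1) (by omega)]
          have h1 : max a lo = a := by omega
          have h2 : max (a + 1) lo = a + 1 := by omega
          rw [h1, h2, ← PySem.List.pyRange_one_cons (show a < min b (hi + 1) by omega)]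
        · simp only [decide_eq_true_eq, hc, if_false]
          rw [ih (a + 1) (by omega)]
          rcases not_and_or.mp hc with h1 | h1 <;> push_neg at h1
          · congr 1; omega
          · rw [PySem.List.pyRange_one_eq_nil (by omega),
              PySem.List.pyRange_one_eq_nil (by omega)]
    exact h (b - a).toNat a rfl

-- A's inner loop ('for a: if cond: yield') as append of the filtered, mapped scan
lemma innerA (limit f_value : Int) (acc : List (Int × Int)) :
    (PySem.List.pyRange 0 (limit + 1)).foldl (fun acc2 a =>
        if 0 ≤ f_value - a * 3 ∧ f_value - a * 3 ≤ limit then acc2 ++ [(a, f_value - a * 3)]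
        else acc2) acc
      = acc ++ ((PySem.List.pyRange 0 (limit + 1)).filter
          (fun a => decide (0 ≤ f_value - a * 3 ∧ f_value - a * 3 ≤ limit))).map
          (fun a => (a, f_value - a * 3)) := by
  simpa using PySem.List.foldl_append_if
    (fun a => decide (0 ≤ f_value - a * 3 ∧ f_value - a * 3 ≤ limit))
    (fun a => (a, f_value - a * 3)) (PySem.List.pyRange 0 (limit + 1)) acc

-- per f_value, A's filtered scan yields exactly B's direct interval
lemma inner_eq (limit f_value : Int) :
    ((PySem.List.pyRange 0 (limit + 1)).filter
        (fun a => decide (0 ≤ f_value - a * 3 ∧ f_value - a * 3 ≤ limit))).map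
        (fun a => (a, f_value - a * 3))
      = (PySem.List.pyRange (max 0 (-(PySem.Int.floordiv (limit - f_value) 3)))
          (min limit (PySem.Int.floordiv f_value 3) + 1)).map
          (fun a => (a, f_value - 3 * a)) := by
  have hlo : -(PySem.Int.floordiv (limit - f_value) 3) = -((limit - f_value) / 3) := by
    rw [PySem.Int.floordiv_eq_ediv_of_pos (by norm_num)]
  have hhi : PySem.Int.floordiv f_value 3 = f_value / 3 := by
    rw [PySem.Int.floordiv_eq_ediv_of_pos (by norm_num)]
  have hcond : ∀ a : Int,
      (0 ≤ f_value - a * 3 ∧ f_value - a * 3 ≤ limit)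
        ↔ (-((limit - f_value) / 3) ≤ a ∧ a ≤ f_value / 3) := by
    intro a
    have h1 : a ≤ f_value / 3 ↔ a * 3 ≤ f_value := Int.le_ediv_iff_mul_le (by norm_num)
    have h2 : -a ≤ (limit - f_value) / 3 ↔ -a * 3 ≤ limit - f_value :=
      Int.le_ediv_iff_mul_le (by norm_num)
    omega
  rw [List.filter_congr (fun a _ => by rw [decide_eq_decide.mpr (hcond a)]),
    filter_pyRange_interval, hlo, hhi]
  have hmin : min (limit + 1) (f_value / 3 + 1) = min limit (f_value / 3) + 1 := by omega
  rw [hmin, List.map_congr_left]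
  intro a _
  have : f_value - a * 3 = f_value - 3 * a := by ring
  rw [this]

-- A yields nothing for f_value beyond 4*limit
lemma tail_nil (limit : Int) : ∀ f_value ∈ PySem.List.pyRange (3 * limit + limit + 1) ((limit + 1) * 3 + limit + 1),
    ((PySem.List.pyRange 0 (limit + 1)).filter
        (fun a => decide (0 ≤ f_value - a * 3 ∧ f_value - a * 3 ≤ limit))).map
        (fun a => (a, f_value - a * 3)) = [] := by
  intro f_value hf
  rw [PySem.List.mem_pyRange_one] at hf
  rw [List.map_eq_nil_iff, List.filter_eq_nil_iff]
  intro a ha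
  rw [PySem.List.mem_pyRange_one] at ha
  simp only [decide_eq_true_eq, not_and]
  omega

-- ===== VERDICT (by name: the statement is the Claim_ definition above) =====
theorem get_ordered_combination_spec : Claim_equal_get_ordered_combination := by
  intro limit _
  unfold Spec_get_ordered_combination get_ordered_combination get_ordered_combination_alt
  simp only [innerA, PySem.List.foldl_append_eq_flatMap, List.nil_append]
  by_cases h : limit < 0
  · rw [PySem.List.pyRange_one_eq_nil (show ((limit + 1) * 3 + limit + 1 : Int) ≤ 0 by omega),
      PySem.List.pyRange_one_eq_nil (show (3 * limit + limit + 1 : Int) ≤ 0 by omega)]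
    simp
  · push_neg at h
    rw [PySem.List.pyRange_one_append 0 (3 * limit + limit + 1) ((limit + 1) * 3 + limit + 1)
      (by omega) (by omega), List.flatMap_append,
      List.flatMap_eq_nil_iff.mpr (tail_nil limit), List.append_nil]
    exact List.flatMap_congr (fun f_value _ => inner_eq limit f_value)
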